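-- pv_equiv track=rewrite | github.com/GundalaNikhil/DSA | dsa-problems/Strings/solutions/STR-010-balanced-brackets-limited-skips.py | can_balance_with_skips
-- ===== SOURCE A (Python) =====
-- def can_balance_with_skips(s: str, k: int) -> bool:
--     balance = 0
--     skips_used = 0
--
--     for char in s:
--         if char == '(':
--             balance += 1
--         else:  # char == ')'
--             balance -= 1
--             if balance < 0:
--                 # Need to skip this ')'
--                 skips_used += 1
--                 balance = 0
--
--     # Remaining balance are unmatched '(' - need skips for them
--     total_skips_needed = skips_used + balance
--     return total_skips_needed <= k
-- ===== SOURCE B (Python) =====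
-- def can_balance_with_skips(s: str, k: int) -> bool:
--     # Pass 1 (left-to-right): count closes with no earlier open to match.
--     pending = 0
--     unmatched_close = 0
--     for ch in s:
--         if ch == '(':
--             pending += 1
--         elif pending > 0:
--             pending -= 1
--         else:
--             unmatched_close += 1
--     # Pass 2 (right-to-left): count opens with no later close to match.
--     closers = 0
--     unmatched_open = 0
--     for ch in reversed(s):
--         if ch != '(':
--             closers += 1
--         elif closers > 0:
--             closers -= 1
--         else:
--             unmatched_open += 1
--     return unmatched_close + unmatched_open <= k
-- ===== Notes on version B (the rewrite author's own statement) =====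
-- stated objective: alternative
-- what changed: Replaces A's single clamped-balance pass (whose leftover counter doubles as the open-skip count) by two independent symmetric counting passes: a left-to-right pass counting unmatched closes and a right-to-left pass counting unmatched opens, returning whether their sum is at most k.
import Mathlib
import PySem

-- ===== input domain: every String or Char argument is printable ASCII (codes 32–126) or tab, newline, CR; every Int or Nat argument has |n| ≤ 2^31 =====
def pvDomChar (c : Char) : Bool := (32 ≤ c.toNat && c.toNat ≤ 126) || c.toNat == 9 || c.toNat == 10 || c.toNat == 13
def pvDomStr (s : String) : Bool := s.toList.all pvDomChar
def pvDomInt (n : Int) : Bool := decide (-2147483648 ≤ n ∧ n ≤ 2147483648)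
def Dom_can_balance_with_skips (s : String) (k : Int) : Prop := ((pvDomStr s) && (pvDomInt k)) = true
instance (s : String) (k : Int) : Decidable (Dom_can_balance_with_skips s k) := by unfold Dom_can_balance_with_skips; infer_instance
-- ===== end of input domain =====

-- B replaces A's single clamped-balance pass by two symmetric counting passes
-- (unmatched closes left-to-right, unmatched opens right-to-left); alternative decomposition, same cost.


-- ===== PORT A =====
-- state = (balance, skips_used)
def pvAStep (st : Int × Int) (c : Char) : Int × Int :=
  if c = '(' then (st.1 + 1, st.2)
  else
    let b := st.1 - 1
    if b < 0 then (0, st.2 + 1) else (b, st.2)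

def can_balance_with_skips (s : String) (k : Int) : Bool :=
  let st := s.toList.foldl pvAStep (0, 0)
  decide (st.2 + st.1 ≤ k)

-- ===== PORT B =====
-- pass 1 state = (pending, unmatched_close)
def pvBStep1 (st : Int × Int) (c : Char) : Int × Int :=
  if c = '(' then (st.1 + 1, st.2)
  else if st.1 > 0 then (st.1 - 1, st.2)
  else (st.1, st.2 + 1)

-- pass 2 state = (closers, unmatched_open)
def pvBStep2 (st : Int × Int) (c : Char) : Int × Int :=
  if c ≠ '(' then (st.1 + 1, st.2)
  else if st.1 > 0 then (st.1 - 1, st.2)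
  else (st.1, st.2 + 1)

def can_balance_with_skips_alt (s : String) (k : Int) : Bool :=
  let p := s.toList.foldl pvBStep1 (0, 0)
  let q := s.toList.reverse.foldl pvBStep2 (0, 0)
  decide (p.2 + q.2 ≤ k)

-- ===== PRECONDITION & SPEC =====
def Spec_can_balance_with_skips (s : String) (k : Int) (out : Bool) : Prop := out = can_balance_with_skips_alt s k
instance (s : String) (k : Int) (out : Bool) : Decidable (Spec_can_balance_with_skips s k out) := by unfold Spec_can_balance_with_skips; infer_instance

-- ===== CLAIM (what is proved, stated in full; the proofs are below) =====
def Claim_equal_can_balance_with_skips : Prop := ∀ (s : String) (k : Int), Dom_can_balance_with_skips s k → Spec_can_balance_with_skips s k (can_balance_with_skips s k)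

-- ===== LEMMAS AND PROOFS =====

-- A's step equals B's pass-1 step on nonnegative balance, and nonnegativity is preserved.
theorem pvAB1_agree (l : List Char) (st : Int × Int) (h : 0 ≤ st.1) :
    l.foldl pvAStep st = l.foldl pvBStep1 st := by
  induction l generalizing st with
  | nil => rfl
  | cons c t ih =>
    simp only [List.foldl_cons]
    have hstep : pvAStep st c = pvBStep1 st c := by
      unfold pvAStep pvBStep1
      dsimp only
      split_ifs <;> simp [Prod.ext_iff] <;> omega
    rw [hstep]
    refine ih _ ?_
    rcases st with ⟨b,u⟩
    simp only [pvBStep1]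
    split_ifs <;> simp <;> omega

theorem pvB1_nonneg (l : List Char) (st : Int × Int) (h1 : 0 ≤ st.1) (h2 : 0 ≤ st.2) :
    0 ≤ (l.foldl pvBStep1 st).1 ∧ 0 ≤ (l.foldl pvBStep1 st).2 := by
  induction l generalizing st with
  | nil => exact ⟨h1, h2⟩
  | cons c t ih =>
    simp only [List.foldl_cons]
    refine ih _ ?_ ?_ <;> (unfold pvBStep1; split_ifs <;> simp <;> omega)
theorem pvB1_shift (l : List Char) (p0 u0 : Int) (hp : 0 ≤ p0) :
    l.foldl pvBStep1 (p0, u0) =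
      ((l.foldl pvBStep1 (0, 0)).1 + max (p0 - (l.foldl pvBStep1 (0, 0)).2) 0,
       u0 + max ((l.foldl pvBStep1 (0, 0)).2 - p0) 0) := by
  induction l using List.reverseRecOn with
  | nil => simp; omega
  | append_singleton t c ih =>
    have hnn := pvB1_nonneg t (0, 0) le_rfl le_rfl
    simp only [List.foldl_append, List.foldl_cons, List.foldl_nil]
    rw [ih]
    obtain ⟨P, hP⟩ : ∃ P, t.foldl pvBStep1 ((0 : Int), (0 : Int)) = P := ⟨_, rfl⟩
    rw [hP] at hnn ⊢
    obtain ⟨Pt, Ut⟩ := P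
    unfold pvBStep1
    simp only at hnn ⊢
    split_ifs <;> simp [Prod.ext_iff] <;> omega
theorem pvB2_swap (l : List Char) :
    l.reverse.foldl pvBStep2 (0, 0) =
      ((l.foldl pvBStep1 (0, 0)).2, (l.foldl pvBStep1 (0, 0)).1) := by
  induction l with
  | nil => rfl
  | cons c t ih =>
    have hnn := pvB1_nonneg t (0, 0) le_rfl le_rfl
    simp only [List.reverse_cons, List.foldl_append, List.foldl_cons, List.foldl_nil, ih]
    rw [show pvBStep1 (0, 0) c = if c = '(' then ((1 : Int), (0 : Int)) else (0, 1) by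
      unfold pvBStep1; dsimp only; split_ifs <;> simp [Prod.ext_iff] <;> omega]
    by_cases hc : c = '('
    · rw [if_pos hc, pvB1_shift t 1 0 (by omega)]
      obtain ⟨P, hP⟩ : ∃ P, t.foldl pvBStep1 ((0 : Int), (0 : Int)) = P := ⟨_, rfl⟩
      rw [hP] at hnn ⊢
      obtain ⟨Pt, Ut⟩ := P
      unfold pvBStep2
      simp only [hc] at hnn ⊢
      split_ifs <;> simp_all [Prod.ext_iff] <;> omega
    · rw [if_neg hc, pvB1_shift t 0 1 le_rfl]
      obtain ⟨P, hP⟩ : ∃ P, t.foldl pvBStep1 ((0 : Int), (0 : Int)) = P := ⟨_, rfl⟩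
      rw [hP] at hnn ⊢
      obtain ⟨Pt, Ut⟩ := P
      unfold pvBStep2
      simp only at hnn ⊢
      split_ifs <;> simp_all [Prod.ext_iff] <;> omega

-- ===== VERDICT (by name: the statement is the Claim_ definition above) =====
theorem can_balance_with_skips_spec : Claim_equal_can_balance_with_skips := by
  intro s k _
  unfold Spec_can_balance_with_skips can_balance_with_skips can_balance_with_skips_alt
  rw [pvAB1_agree _ _ le_rfl, pvB2_swap]
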